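-- pv_equiv track=rewrite | github.com/prasanth-ashokan/My-Programs | cf/oc19 lo/xor.py | but
-- ===== SOURCE A (Python) =====
-- def but(k):
--         n=12
--         l=[5665,54,67,7787,6478,54,67,78,3,8,1,6]
--         for i in range(k):
--             d1=i%n
--             a=int(l[d1])
--             d2=n-(i%n)-1
--             b=int(l[d2])
--             l[d1]=(a^b)
--             s=''
--             for i in l:
--                 s+=str(i)+' '
--         return (s)
-- ===== SOURCE B (Python) =====
-- def but(k):
--     # One full 12-step pass maps each pair (l[j], l[11-j]) to (a^b, a), a map of order 3,
--     # so the state is periodic in k with period 36: simulate only the k-equivalent m < 36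
--     # steps, and build the output string once at the end.
--     n = 12
--     l = [5665, 54, 67, 7787, 6478, 54, 67, 78, 3, 8, 1, 6]
--     m = (k // n % 3) * n + k % n
--     for i in range(m):
--         d = i % n
--         l[d] = l[d] ^ l[n - d - 1]
--     s = ''
--     for x in l:
--         s += str(x) + ' '
--     return s
-- ===== Notes on version B (the rewrite author's own statement) =====
-- stated objective: faster
-- what changed: B replaces A's k-iteration simulation (which also rebuilds the output string every iteration) by the closed-form observation that one 12-step pass acts on each pair (l[j], l[11-j]) as (a,b)->(a^b,a), a map of order 3, so the state has period 36 in k: B simulates only (k//12 % 3)*12 + k%12 < 36 steps and builds the string once.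
-- crash fix: For k <= 0 A raises UnboundLocalError (the loop never runs, so s is never assigned); B returns the rendering of the list after the k-equivalent m = (k//12 % 3)*12 + k%12 steps (for k = 0, the initial list). — e.g. on but(0): A raises UnboundLocalError, B returns "5665 54 67 7787 6478 54 67 78 3 8 1 6 "
import Mathlib
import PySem

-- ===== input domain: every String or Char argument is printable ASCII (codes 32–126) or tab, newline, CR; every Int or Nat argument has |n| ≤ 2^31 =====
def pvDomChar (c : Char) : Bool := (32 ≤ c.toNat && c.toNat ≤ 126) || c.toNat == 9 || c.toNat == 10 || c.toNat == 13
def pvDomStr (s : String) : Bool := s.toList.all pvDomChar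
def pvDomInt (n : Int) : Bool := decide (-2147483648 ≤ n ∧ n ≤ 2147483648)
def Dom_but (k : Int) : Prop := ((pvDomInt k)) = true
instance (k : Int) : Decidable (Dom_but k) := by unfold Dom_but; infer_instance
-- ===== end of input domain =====

-- B simulates only the k-equivalent m < 36 XOR steps (the 12-step pass has order 3) and
-- builds the string once, instead of A's k steps each rebuilding the string: faster per the
-- timing run (asymptotic, O(k·n) → O(n)).

-- ===== PORT A =====
def butInit : List Int := [5665, 54, 67, 7787, 6478, 54, 67, 78, 3, 8, 1, 6]

-- 's = ""; for i in l: s += str(i) + " "' (rebuilt each iteration of A's outer loop)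
def butRender (l : List Int) : String :=
  l.foldl (fun s x => s ++ PySem.Int.toStr x ++ " ") ""

-- A's loop body; indices i%12 and 12-i%12-1 are always in [0,12) = range of l, so
-- pyGetD/pySetD are exact (no IndexError is reachable)
def butStep (st : List Int × String) (i : Int) : List Int × String :=
  let l := st.1
  let d1 := PySem.Int.mod i 12
  let a := PySem.List.pyGetD l d1 0
  let d2 := 12 - PySem.Int.mod i 12 - 1
  let b := PySem.List.pyGetD l d2 0
  let l2 := PySem.List.pySetD l d1 (PySem.Int.bxor a b)
  (l2, butRender l2)

-- for k ≤ 0 the loop never runs and Python's 's' is unbound (UnboundLocalError): excluded by Pre_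
def but (k : Int) : String :=
  ((PySem.List.pyRange 0 k 1).foldl butStep (butInit, "")).2

-- ===== PORT B =====
def butAltStep (l : List Int) (i : Int) : List Int :=
  let d := PySem.Int.mod i 12
  PySem.List.pySetD l d
    (PySem.Int.bxor (PySem.List.pyGetD l d 0) (PySem.List.pyGetD l (12 - d - 1) 0))

def but_alt (k : Int) : String :=
  let m := PySem.Int.mod (PySem.Int.floordiv k 12) 3 * 12 + PySem.Int.mod k 12
  butRender ((PySem.List.pyRange 0 m 1).foldl butAltStep butInit)

-- ===== PRECONDITION & SPEC =====
-- Pre_ excludes exactly k ≤ 0, where A's loop body never runs and A raises UnboundLocalError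
def Pre_but (k : Int) : Prop := 1 ≤ k
instance (k : Int) : Decidable (Pre_but k) := by unfold Pre_but; infer_instance

def pvWitness_but : Int := 5

-- For k ≤ 0 A raises UnboundLocalError ('s' never assigned); B returns the rendering of the
-- list after the k-equivalent m = (k//12 % 3)*12 + k%12 steps (for k = 0, the initial list).
def Raises_but (k : Int) : Prop := k ≤ 0
instance (k : Int) : Decidable (Raises_but k) := by unfold Raises_but; infer_instance
def pvRaiseWitness_but : Int := 0
def pvRaiseWitnessOut_but : String := "5665 54 67 7787 6478 54 67 78 3 8 1 6 "

def Spec_but (k : Int) (out : String) : Prop := out = but_alt k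
instance (k : Int) (out : String) : Decidable (Spec_but k out) := by unfold Spec_but; infer_instance

-- ===== CLAIM (what is proved, stated in full; the proofs are below) =====
def Claim_equal_but : Prop := ∀ (k : Int), Dom_but k → Pre_but k → Spec_but k (but k)
def Claim_raises_but : Prop := (∀ (k : Int), Dom_but k → Raises_but k → ¬ Pre_but k) ∧
  (Dom_but (pvRaiseWitness_but) ∧ Raises_but (pvRaiseWitness_but) ∧ but_alt (pvRaiseWitness_but) = pvRaiseWitnessOut_but)

-- ===== LEMMAS AND PROOFS =====

-- the common state sequence: gN n = the list after n XOR steps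
def gN : Nat → List Int
  | 0 => butInit
  | n + 1 => butAltStep (gN n) (n : Int)

theorem butStep_eq (st : List Int × String) (i : Int) :
    butStep st i = (butAltStep st.1 i, butRender (butAltStep st.1 i)) := rfl

theorem butAltStep_natCast_mod (l : List Int) (n : Nat) :
    butAltStep l ((n % 12 : Nat) : Int) = butAltStep l (n : Int) := by
  simp [butAltStep]

theorem foldB_eq_gN (n : Nat) :
    (PySem.List.pyRange 0 (n : Int) 1).foldl butAltStep butInit = gN n := by
  induction n with
  | zero => simp [PySem.List.pyRange_one_eq_nil, gN]
  | succ n ih =>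
      have h : ((n + 1 : Nat) : Int) = (n : Int) + 1 := by push_cast; ring
      rw [h, PySem.List.pyRange_one_succ_right (by positivity), List.foldl_append]
      simp [ih, gN]

theorem foldA_eq_gN (n : Nat) (hn : 1 ≤ n) :
    (PySem.List.pyRange 0 (n : Int) 1).foldl butStep (butInit, "") =
      (gN n, butRender (gN n)) := by
  induction n with
  | zero => omega
  | succ n ih =>
      have h : ((n + 1 : Nat) : Int) = (n : Int) + 1 := by push_cast; ring
      rw [h, PySem.List.pyRange_one_succ_right (by positivity), List.foldl_append]
      by_cases h1 : 1 ≤ n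
      · simp [ih h1, butStep_eq, gN]
      · have : n = 0 := by omega
        subst this
        simp [PySem.List.pyRange_one_eq_nil, butStep_eq, gN]

set_option maxRecDepth 8192 in
theorem gN_period (n : Nat) : gN (n + 36) = gN n := by
  induction n with
  | zero => decide
  | succ n ih =>
      have h36 : n + 1 + 36 = (n + 36) + 1 := by omega
      rw [h36]
      show butAltStep (gN (n + 36)) ((n + 36 : Nat) : Int) = gN (n + 1)
      rw [ih]
      have hm : (n + 36) % 12 = n % 12 := by omega
      calc butAltStep (gN n) ((n + 36 : Nat) : Int)
          = butAltStep (gN n) (((n + 36) % 12 : Nat) : Int) := (butAltStep_natCast_mod _ _).symm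
        _ = butAltStep (gN n) ((n % 12 : Nat) : Int) := by rw [hm]
        _ = butAltStep (gN n) (n : Int) := butAltStep_natCast_mod _ _
        _ = gN (n + 1) := rfl

theorem gN_mod (n : Nat) : gN n = gN (n % 36) := by
  induction n using Nat.strong_induction_on with
  | _ n ih =>
      by_cases h : n < 36
      · rw [Nat.mod_eq_of_lt h]
      · have hn : n = (n - 36) + 36 := by omega
        rw [hn, gN_period, ih (n - 36) (by omega)]
        congr 1
        omega

theorem but_alt_eq (k : Int) (hk : 1 ≤ k) : but_alt k = butRender (gN (k.toNat % 36)) := by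
  show butRender ((PySem.List.pyRange 0
      (PySem.Int.mod (PySem.Int.floordiv k 12) 3 * 12 + PySem.Int.mod k 12) 1).foldl
      butAltStep butInit) = _
  have hm : PySem.Int.mod (PySem.Int.floordiv k 12) 3 * 12 + PySem.Int.mod k 12
      = ((k.toNat % 36 : Nat) : Int) := by
    rw [PySem.Int.floordiv_eq_ediv_of_pos (by omega), PySem.Int.mod_eq_emod_of_pos (a := k / 12) (by omega),
        PySem.Int.mod_eq_emod_of_pos (a := k) (by omega)]
    omega
  rw [hm, foldB_eq_gN]

-- ===== VERDICT (by name: the statement is the Claim_ definition above) =====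
theorem but_spec : Claim_equal_but := by
  intro k _ hk
  unfold Pre_but at hk
  unfold Spec_but but
  have hrange : PySem.List.pyRange 0 k 1 = PySem.List.pyRange 0 ((k.toNat : Nat) : Int) 1 := by
    congr 1
    omega
  rw [hrange, foldA_eq_gN k.toNat (by omega), but_alt_eq k hk, gN_mod k.toNat]

theorem but_raises : Claim_raises_but := by
  unfold Claim_raises_but
  exact ⟨by intro k _ h; unfold Raises_but at h; unfold Pre_but; omega, by decide⟩

-- sanity corollary: at the raise witness, B's port really returns the stated literal
theorem but_raise_witness_ok : but_alt pvRaiseWitness_but = pvRaiseWitnessOut_but :=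
  but_raises.2.2.2
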